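-- pv_equiv track=rewrite | github.com/Jpsousa4/wordle-tool | wordletool.py | occurancesAtIdx
-- ===== SOURCE A (Python) =====
-- def occurancesAtIdx(listOWords):
--     listOccurances = list()
--     for idx in range(5):
--         dictOccurances = dict()
--         wordles = list(listOWords)
--         wordles = [wordle[idx] for wordle in wordles]
--         bigstring = "".join(wordles)
--         for letter in "abcdefghijklmnopqrstuvwxyz":
--             dictOccurances[letter] = bigstring.count(letter)
--             dictOccurances = dict(sorted(dictOccurances.items(), key=lambda item: item[1]))
--         listOccurances.append(dictOccurances)
--     return listOccurances
-- ===== SOURCE B (Python) =====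
-- def occurancesAtIdx(listOWords):
--     # one word-major tally pass over all words, then per position a bucket
--     # (counting-sort) emission instead of a comparison sort of the 26 pairs
--     counts = {}
--     for word in listOWords:
--         for idx in range(5):
--             key = (idx, word[idx])
--             counts[key] = counts.get(key, 0) + 1
--     listOccurances = []
--     for idx in range(5):
--         buckets = {}
--         for letter in "abcdefghijklmnopqrstuvwxyz":
--             buckets.setdefault(counts.get((idx, letter), 0), []).append(letter)
--         dictOccurances = {}
--         for c in sorted(buckets):
--             for letter in buckets[c]:
--                 dictOccurances[letter] = c
--         listOccurances.append(dictOccurances)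
--     return listOccurances
-- ===== Notes on version B (the rewrite author's own statement) =====
-- stated objective: faster
-- what changed: B tallies all 5 positions in ONE word-major pass over the words into a single dict keyed by (position, letter), then orders each position's 26 letters by a counting/bucket sort (group letters by count, emit buckets by ascending count) instead of A's per-position string join, 26 string.count scans and 26 full re-sorts of the dict items.
import Mathlib
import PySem

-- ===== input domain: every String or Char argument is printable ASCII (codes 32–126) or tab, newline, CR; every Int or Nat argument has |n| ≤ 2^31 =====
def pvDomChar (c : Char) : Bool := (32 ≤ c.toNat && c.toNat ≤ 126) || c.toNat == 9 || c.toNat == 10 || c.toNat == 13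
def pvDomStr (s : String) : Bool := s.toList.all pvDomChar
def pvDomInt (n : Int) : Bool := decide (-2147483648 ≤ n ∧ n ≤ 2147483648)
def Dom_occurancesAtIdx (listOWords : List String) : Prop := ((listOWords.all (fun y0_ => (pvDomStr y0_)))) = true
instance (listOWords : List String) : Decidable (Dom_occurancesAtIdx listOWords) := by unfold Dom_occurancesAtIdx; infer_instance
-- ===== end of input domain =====

-- B tallies all positions in one word-major pass into a dict keyed by (position, letter) and
-- orders each position's letters by a bucket (counting-sort) emission, instead of A's
-- per-position join + 26 string.count scans + 26 re-sorts of the dict items.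


-- ===== PORT A =====
def occurancesAtIdx (listOWords : List String) : List (List (String × Int)) :=
  (PySem.List.pyRange 0 5).foldl (fun listOccurances idx =>
    let wordles := listOWords
    -- wordle[idx]: pyGet? = none is Python's IndexError (word shorter than 5), excluded by Pre_
    let wordles := wordles.map (fun wordle =>
      ((PySem.List.pyGet? wordle.toList idx).map (fun c => [c])).getD [])
    let bigstring := PySem.Chars.join [] wordles
    let dictOccurances := "abcdefghijklmnopqrstuvwxyz".toList.foldl
      (fun (dictOccurances : PySem.Dict String Int) letter =>
        let d := dictOccurances.insert (String.ofList [letter])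
          ((PySem.Chars.count bigstring [letter] : Int))
        PySem.Dict.ofList (PySem.List.sorted d.items (fun item => item.2)))
      PySem.Dict.empty
    listOccurances ++ [dictOccurances.items]) []

-- ===== PORT B =====
def occurancesAtIdx_alt (listOWords : List String) : List (List (String × Int)) :=
  -- one tally pass over the words; counts[(idx, ch)] = counts.get((idx, ch), 0) + 1
  let counts := listOWords.foldl (fun (counts : PySem.Dict (Int × Char) Int) word =>
    (PySem.List.pyRange 0 5).foldl (fun counts idx =>
      -- word[idx]: pyGet? = none is Python's IndexError (word shorter than 5), excluded by Pre_
      let key := (idx, (PySem.List.pyGet? word.toList idx).getD ' ')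
      counts.insert key (counts.getD key 0 + 1)) counts) PySem.Dict.empty
  (PySem.List.pyRange 0 5).foldl (fun listOccurances idx =>
    -- buckets.setdefault(c, []).append(letter)  =  modify c [] (· ++ [letter])
    let buckets := "abcdefghijklmnopqrstuvwxyz".toList.foldl
      (fun (buckets : PySem.Dict Int (List Char)) letter =>
        buckets.modify (counts.getD (idx, letter) 0) [] (· ++ [letter])) PySem.Dict.empty
    -- for c in sorted(buckets): for letter in buckets[c]: d[letter] = c
    let dictOccurances := (PySem.List.sorted buckets.keys (fun x => x)).foldl
      (fun (d : PySem.Dict String Int) c =>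
        (buckets.getD c []).foldl (fun d letter => d.insert (String.ofList [letter]) c) d)
      PySem.Dict.empty
    listOccurances ++ [dictOccurances.items]) []

-- ===== PRECONDITION & SPEC =====
-- Pre_ excludes exactly the inputs where A raises IndexError: a word of length < 5.
def Pre_occurancesAtIdx (listOWords : List String) : Prop :=
  ∀ w ∈ listOWords, 5 ≤ w.toList.length
instance (listOWords : List String) : Decidable (Pre_occurancesAtIdx listOWords) := by
  unfold Pre_occurancesAtIdx; infer_instance

def pvWitness_occurancesAtIdx : List String := ["crane", "slate"]

def Spec_occurancesAtIdx (listOWords : List String) (out : List (List (String × Int))) : Prop := out = occurancesAtIdx_alt listOWords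
instance (listOWords : List String) (out : List (List (String × Int))) : Decidable (Spec_occurancesAtIdx listOWords out) := by unfold Spec_occurancesAtIdx; infer_instance

-- ===== CLAIM (what is proved, stated in full; the proofs are below) =====
def Claim_equal_occurancesAtIdx : Prop := ∀ (listOWords : List String), Dom_occurancesAtIdx listOWords → Pre_occurancesAtIdx listOWords → Spec_occurancesAtIdx listOWords (occurancesAtIdx listOWords)

-- ===== LEMMAS AND PROOFS =====

-- count of a single-character needle is List.count
theorem chars_count_go_singleton (c : Char) (s : List Char) :
    ∀ (fuel acc : Nat), s.length ≤ fuel →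
      PySem.Chars.count.go [c] fuel s acc = acc + s.count c := by
  induction s with
  | nil => intro fuel acc _; cases fuel <;> simp [PySem.Chars.count.go]
  | cons h t ih =>
    intro fuel acc hf
    cases fuel with
    | zero => simp at hf
    | succ n =>
      have hfn : t.length ≤ n := by simpa using hf
      by_cases hc : c = h
      · subst hc
        simp only [PySem.Chars.count.go]
        rw [if_pos (by simp [List.isPrefixOf])]
        rw [show List.drop [c].length (c :: t) = t from by simp]
        rw [ih n (acc + 1) hfn]
        simp
        omega
      · simp only [PySem.Chars.count.go]
        rw [if_neg (by simp [List.isPrefixOf, hc])]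
        rw [ih n acc hfn]
        have : (h == c) = false := by simp [Ne.symm hc]
        simp [List.count_cons, this]

theorem chars_count_singleton (s : List Char) (c : Char) :
    PySem.Chars.count s [c] = s.count c := by
  have := chars_count_go_singleton c s s.length 0 (Nat.le_refl _)
  simpa [PySem.Chars.count] using this

-- dict(l) for a pair list with distinct keys has exactly l as items
theorem ofList_items_of_nodup {ν : Type} (l : List (String × ν))
    (h : (l.map Prod.fst).Nodup) : (PySem.Dict.ofList l).items = l := by
  have := PySem.Dict.items_foldl_insert_fresh l Prod.fst Prod.snd PySem.Dict.empty
    (fun a _ => PySem.Dict.contains_empty a.1) h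
  simpa [PySem.Dict.ofList, PySem.Dict.update] using this

-- a stable sort of (sorted X ++ [y]) equals the sort of (X ++ [y])
theorem sorted_sorted_append_singleton {α : Type} (X : List α) (y : α) (key : α → Int) :
    PySem.List.sorted (PySem.List.sorted X key ++ [y]) key =
      PySem.List.sorted (X ++ [y]) key := by
  rw [PySem.List.sorted_eq_foldl_insertBy (PySem.List.sorted X key ++ [y]) key,
      PySem.List.sorted_eq_foldl_insertBy (X ++ [y]) key,
      List.foldl_append, List.foldl_append,
      ← PySem.List.sorted_eq_foldl_insertBy, ← PySem.List.sorted_eq_foldl_insertBy,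
      PySem.List.sorted_sorted]

-- A's inner letters loop computes one stable sort of all (letter, value) pairs
theorem a_inner_fold (v : Char → Int) :
    ∀ (rest done : List Char), (done ++ rest).Nodup →
      rest.foldl (fun (d : PySem.Dict String Int) letter =>
          PySem.Dict.ofList (PySem.List.sorted
            (d.insert (String.ofList [letter]) (v letter)).items (fun item => item.2)))
        (PySem.Dict.ofList (PySem.List.sorted
          (done.map (fun c => (String.ofList [c], v c))) (fun item => item.2))) =
      PySem.Dict.ofList (PySem.List.sorted
        ((done ++ rest).map (fun c => (String.ofList [c], v c))) (fun item => item.2)) := by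
  intro rest
  induction rest with
  | nil => intro done _; simp
  | cons r t ih =>
    intro done hnd
    have hsorted_nodup : ((PySem.List.sorted
        (done.map (fun c => (String.ofList [c], v c))) (fun item => item.2)).map Prod.fst).Nodup := by
      have hperm : ((PySem.List.sorted (done.map (fun c => (String.ofList [c], v c)))
          (fun item => item.2)).map Prod.fst).Perm
          ((done.map (fun c => (String.ofList [c], v c))).map Prod.fst) :=
        (PySem.List.sorted_perm _ _ _).map Prod.fst
      refine hperm.nodup_iff.mpr ?_
      rw [List.map_map]
      refine List.Nodup.map ?_ (by
        have := hnd; rw [List.nodup_append] at this; exact this.1)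
      intro a b hab
      have := congrArg String.toList hab
      simpa using this
    set d := PySem.Dict.ofList (PySem.List.sorted
      (done.map (fun c => (String.ofList [c], v c))) (fun item => item.2)) with hd
    have hitems : d.items = PySem.List.sorted
        (done.map (fun c => (String.ofList [c], v c))) (fun item => item.2) :=
      ofList_items_of_nodup _ hsorted_nodup
    have hnotmem : r ∉ done := by
      rw [List.nodup_append] at hnd
      exact fun hr => hnd.2.2 r hr r (by simp) rfl
    have hcontains : d.contains (String.ofList [r]) = false := by
      rw [← Bool.not_eq_true, PySem.Dict.contains_iff_mem_keys]
      intro hmem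
      simp only [PySem.Dict.keys, hitems] at hmem
      have : String.ofList [r] ∈ (done.map (fun c => (String.ofList [c], v c))).map Prod.fst :=
        ((PySem.List.sorted_perm _ _ _).map Prod.fst).mem_iff.mp hmem
      simp only [List.map_map, List.mem_map] at this
      obtain ⟨c, hc, hcr⟩ := this
      have hccr := congrArg String.toList hcr
      have : c = r := by simpa using hccr
      exact hnotmem (this ▸ hc)
    have hstep : (d.insert (String.ofList [r]) (v r)).items =
        PySem.List.sorted (done.map (fun c => (String.ofList [c], v c))) (fun item => item.2)
          ++ [(String.ofList [r], v r)] := by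
      rw [PySem.Dict.items_insert_of_not_contains d (v r) hcontains, hitems]
    have hsortstep : PySem.List.sorted ((d.insert (String.ofList [r]) (v r)).items)
        (fun item => item.2) =
        PySem.List.sorted ((done ++ [r]).map (fun c => (String.ofList [c], v c)))
          (fun item => item.2) := by
      rw [hstep, sorted_sorted_append_singleton]
      simp
    have hnd' : ((done ++ [r]) ++ t).Nodup := by
      simpa [List.append_assoc] using hnd
    rw [List.foldl_cons]
    have hstepd : PySem.Dict.ofList (PySem.List.sorted
        ((d.insert (String.ofList [r]) (v r)).items) (fun item => item.2)) =
        PySem.Dict.ofList (PySem.List.sorted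
          ((done ++ [r]).map (fun c => (String.ofList [c], v c))) (fun item => item.2)) := by
      rw [hsortstep]
    show t.foldl _ (PySem.Dict.ofList (PySem.List.sorted
        ((d.insert (String.ofList [r]) (v r)).items) (fun item => item.2))) = _
    rw [hstepd, ih (done ++ [r]) hnd']
    simp

-- insertion places x after every element it is not 'before' and before the rest
theorem insertBy_middle {α : Type} (before : α → α → Bool) (x : α) (A B : List α)
    (hA : ∀ a ∈ A, before x a = false) (hB : ∀ b ∈ B, before x b = true) :
    PySem.List.insertBy before x (A ++ B) = A ++ x :: B := by
  induction A with
  | nil =>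
    cases B with
    | nil => simp [PySem.List.insertBy]
    | cons b t => simp [PySem.List.insertBy, hB b (by simp)]
  | cons a s ih =>
    have ha : before x a = false := hA a (by simp)
    simp only [List.cons_append, PySem.List.insertBy, ha, Bool.false_eq_true, if_false,
      List.cons.injEq, true_and]
    exact ih (fun a' ha' => hA a' (by simp [ha']))

-- THE BUCKET CHARACTERISATION OF A STABLE SORT: sorting by an Int key equals concatenating,
-- over the distinct key values in ascending order, the elements with that key in input order.
theorem sorted_eq_buckets {α : Type} (key : α → Int) (l : List α) :
    PySem.List.sorted l key =
      (PySem.List.sorted (PySem.Set.ofList (l.map key)) (fun x => x)).flatMap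
        (fun v => l.filter (fun a => key a == v)) := by
  induction l using List.reverseRecOn with
  | nil => simp [PySem.List.sorted]
  | append_singleton t x ih =>
    set m := t.map key with hm
    set kx := key x with hkx
    set S' := PySem.List.sorted (PySem.Set.ofList ((t ++ [x]).map key)) (fun x => x) with hS'
    have hmapkey : (t ++ [x]).map key = m ++ [kx] := by simp [hm, hkx]
    have hmemS' : kx ∈ S' := by
      rw [hS', PySem.List.mem_sorted, PySem.Set.mem_ofList, hmapkey]
      simp
    obtain ⟨P, Q, hPQ⟩ := List.append_of_mem hmemS'
    have hlt : S'.Pairwise (· < ·) := PySem.List.sorted_ofList_pairwise_lt _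
    rw [hPQ] at hlt
    rw [List.pairwise_append] at hlt
    obtain ⟨hPp, hQp', hcross⟩ := hlt
    rw [List.pairwise_cons] at hQp'
    obtain ⟨hkxQ, hQp⟩ := hQp'
    have hPkx : ∀ p ∈ P, p < kx := fun p hp => hcross p hp kx (by simp)
    -- buckets over t and over t ++ [x]
    have hfP : ∀ v ∈ P, (t ++ [x]).filter (fun a => key a == v) = t.filter (fun a => key a == v) := by
      intro v hv
      have : (kx == v) = false := by
        have := hPkx v hv; simp; omega
      simp [List.filter_append, ← hkx, this]
    have hfQ : ∀ v ∈ Q, (t ++ [x]).filter (fun a => key a == v) = t.filter (fun a => key a == v) := by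
      intro v hv
      have : (kx == v) = false := by
        have := hkxQ v hv; simp; omega
      simp [List.filter_append, ← hkx, this]
    have hfkx : (t ++ [x]).filter (fun a => key a == kx) = t.filter (fun a => key a == kx) ++ [x] := by
      simp [List.filter_append, ← hkx]
    -- rewrite the sort of t ++ [x] as one insertion into the sort of t
    have hstep : PySem.List.sorted (t ++ [x]) key =
        PySem.List.insertBy (fun a b => decide (key a < key b)) x (PySem.List.sorted t key) := by
      rw [PySem.List.sorted_eq_foldl_insertBy (t ++ [x]) key, List.foldl_append,
        ← PySem.List.sorted_eq_foldl_insertBy]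
      simp
    -- old sorted distinct keys decompose as P ++ (kx bucket if present) ++ Q
    have hold : (PySem.List.sorted (PySem.Set.ofList m) (fun x => x)).flatMap
          (fun v => t.filter (fun a => key a == v)) =
        (P.flatMap (fun v => t.filter (fun a => key a == v)) ++ t.filter (fun a => key a == kx))
          ++ Q.flatMap (fun v => t.filter (fun a => key a == v)) := by
      by_cases hin : kx ∈ m
      · have hsets : PySem.Set.ofList (m ++ [kx]) = PySem.Set.ofList m := by
          rw [PySem.Set.ofList_eq_foldl, List.foldl_append, ← PySem.Set.ofList_eq_foldl]
          have hc : PySem.Set.contains (PySem.Set.ofList m) kx = true := by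
            simp only [PySem.Set.contains, List.contains_eq_mem, decide_eq_true_eq]
            exact (PySem.Set.mem_ofList m kx).mpr hin
          simp only [List.foldl_cons, List.foldl_nil]
          unfold PySem.Set.add
          rw [hc]
          simp
        have hSold : PySem.List.sorted (PySem.Set.ofList m) (fun x => x) = P ++ kx :: Q := by
          rw [← hsets, ← hmapkey, ← hS', hPQ]
        rw [hSold]
        simp [List.flatMap_append, List.flatMap_cons, List.append_assoc]
      · have hsets : PySem.Set.ofList (m ++ [kx]) = PySem.Set.ofList m ++ [kx] := by
          rw [PySem.Set.ofList_eq_foldl, List.foldl_append, ← PySem.Set.ofList_eq_foldl]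
          have hc : PySem.Set.contains (PySem.Set.ofList m) kx = false := by
            simp only [PySem.Set.contains, List.contains_eq_mem, decide_eq_false_iff_not]
            exact fun h => hin ((PySem.Set.mem_ofList m kx).mp h)
          simp only [List.foldl_cons, List.foldl_nil]
          unfold PySem.Set.add
          rw [hc]
          simp
        have hperm : (P ++ Q).Perm (PySem.Set.ofList m) := by
          have h1 : (P ++ kx :: Q).Perm (PySem.Set.ofList m ++ [kx]) := by
            rw [← hPQ, ← hsets, ← hmapkey, hS']
            exact PySem.List.sorted_perm _ _ _
          have h2 : (kx :: (P ++ Q)).Perm (kx :: PySem.Set.ofList m) :=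
            ((List.perm_middle).symm.trans h1).trans (List.perm_append_singleton kx _)
          exact (List.perm_cons kx).mp h2
        have hSold : PySem.List.sorted (PySem.Set.ofList m) (fun x => x) = P ++ Q := by
          apply PySem.List.sorted_eq_of_perm_of_pairwise_lt _ _ _ hperm
          rw [List.pairwise_append]
          exact ⟨hPp, hQp, fun p hp q hq => lt_trans (hPkx p hp) (hkxQ q hq)⟩
        have hnilkx : t.filter (fun a => key a == kx) = [] := by
          rw [List.filter_eq_nil_iff]
          intro a ha h
          exact hin (by
            rw [hm]
            exact List.mem_map.mpr ⟨a, ha, by simpa using h⟩)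
        rw [hSold]
        simp [List.flatMap_append, hnilkx]
    -- the insertion lands exactly between the kx bucket and the Q buckets
    have hins : PySem.List.insertBy (fun a b => decide (key a < key b)) x
        ((P.flatMap (fun v => t.filter (fun a => key a == v)) ++ t.filter (fun a => key a == kx))
          ++ Q.flatMap (fun v => t.filter (fun a => key a == v))) =
        (P.flatMap (fun v => t.filter (fun a => key a == v)) ++ t.filter (fun a => key a == kx))
          ++ x :: Q.flatMap (fun v => t.filter (fun a => key a == v)) := by
      apply insertBy_middle
      · intro a ha
        rw [List.mem_append] at ha
        rcases ha with ha | ha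
        · rw [List.mem_flatMap] at ha
          obtain ⟨v, hv, ha⟩ := ha
          rw [List.mem_filter] at ha
          have : key a = v := by simpa using ha.2
          have := hPkx v hv
          simp only [decide_eq_false_iff_not]
          omega
        · rw [List.mem_filter] at ha
          have : key a = kx := by simpa using ha.2
          simp only [decide_eq_false_iff_not]
          omega
      · intro b hb
        rw [List.mem_flatMap] at hb
        obtain ⟨v, hv, hb⟩ := hb
        rw [List.mem_filter] at hb
        have : key b = v := by simpa using hb.2
        have := hkxQ v hv
        simp only [decide_eq_true_eq]
        omega
    have hPflat : P.flatMap (fun v => (t ++ [x]).filter (fun a => key a == v)) =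
        P.flatMap (fun v => t.filter (fun a => key a == v)) := by
      rw [List.flatMap_def, List.flatMap_def, List.map_congr_left hfP]
    have hQflat : Q.flatMap (fun v => (t ++ [x]).filter (fun a => key a == v)) =
        Q.flatMap (fun v => t.filter (fun a => key a == v)) := by
      rw [List.flatMap_def, List.flatMap_def, List.map_congr_left hfQ]
    rw [hstep, ih, hold, hins, hPQ]
    rw [List.flatMap_append, List.flatMap_cons, hPflat, hQflat, hfkx]
    simp [List.append_assoc]

-- counting lemmas for B's one-pass (position, letter) tally
theorem block_count (f : Int → Char) (idx : Int) (c : Char)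
    (h : idx ∈ PySem.List.pyRange 0 5) :
    ((PySem.List.pyRange 0 5).map (fun i => (i, f i))).count (idx, c) =
      [f idx].count c := by
  have h5 : PySem.List.pyRange 0 5 = [0,1,2,3,4] := by decide
  rw [h5] at h ⊢
  simp only [List.mem_cons, List.not_mem_nil, or_false] at h
  rcases h with h|h|h|h|h <;> subst h <;>
    simp [List.count_cons, List.count_nil, Prod.ext_iff]

theorem flat_count (listOWords : List String) (idx : Int) (c : Char)
    (h : idx ∈ PySem.List.pyRange 0 5) :
    (listOWords.flatMap (fun w => (PySem.List.pyRange 0 5).map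
        (fun i => (i, (PySem.List.pyGet? w.toList i).getD ' ')))).count (idx, c) =
      (listOWords.map (fun w => (PySem.List.pyGet? w.toList idx).getD ' ')).count c := by
  induction listOWords with
  | nil => simp
  | cons w ws ih =>
    rw [List.flatMap_cons, List.count_append, ih, List.map_cons]
    rw [block_count (fun i => (PySem.List.pyGet? w.toList i).getD ' ') idx c h]
    simp [List.count_cons]
    omega

-- B-side: the tally dict looked up at (idx, ch) is the column count
theorem b_counts_getD (L : List String) (idx : Int) (ch : Char)
    (h : idx ∈ PySem.List.pyRange 0 5) :
    (L.foldl (fun (counts : PySem.Dict (Int × Char) Int) word =>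
       (PySem.List.pyRange 0 5).foldl (fun counts i =>
         counts.insert (i, (PySem.List.pyGet? word.toList i).getD ' ')
           (counts.getD (i, (PySem.List.pyGet? word.toList i).getD ' ') 0 + 1)) counts)
       PySem.Dict.empty).getD (idx, ch) 0
    = ((L.map (fun w => (PySem.List.pyGet? w.toList idx).getD ' ')).count ch : Int) := by
  have hset : (L.flatMap (fun w => (PySem.List.pyRange 0 5).map
        (fun i => (i, (PySem.List.pyGet? w.toList i).getD ' ')))).foldl
      (fun (d : PySem.Dict (Int × Char) Int) k => d.insert k (d.getD k 0 + 1))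
      PySem.Dict.empty
    = L.foldl (fun (counts : PySem.Dict (Int × Char) Int) word =>
       (PySem.List.pyRange 0 5).foldl (fun counts i =>
         counts.insert (i, (PySem.List.pyGet? word.toList i).getD ' ')
           (counts.getD (i, (PySem.List.pyGet? word.toList i).getD ' ') 0 + 1)) counts)
       PySem.Dict.empty := by
    rw [List.foldl_flatMap]
    apply PySem.List.foldl_congr_mem
    intro acc w _
    rw [List.foldl_map]
  rw [← hset, PySem.Dict.getD_foldl_insert_add_one, PySem.Dict.getD_empty,
    flat_count L idx ch h]
  simp

-- B-side: the bucket dict's keys are the distinct count values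
theorem b_buckets_keys (cnt : Char → Int) :
    (("abcdefghijklmnopqrstuvwxyz".toList).foldl
       (fun (b : PySem.Dict Int (List Char)) letter => b.modify (cnt letter) [] (· ++ [letter]))
       PySem.Dict.empty).keys
    = PySem.Set.ofList (("abcdefghijklmnopqrstuvwxyz".toList).map cnt) := by
  rw [PySem.Dict.keys_foldl_modify_key ("abcdefghijklmnopqrstuvwxyz".toList) cnt []
    (fun _ x => (· ++ [x])) PySem.Dict.empty, PySem.Dict.keys_empty, PySem.Set.update_nil_left]

-- B-side: bucket c holds, in a–z order, the letters whose count is c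
theorem b_buckets_getD (cnt : Char → Int) (c : Int) :
    (("abcdefghijklmnopqrstuvwxyz".toList).foldl
       (fun (b : PySem.Dict Int (List Char)) letter => b.modify (cnt letter) [] (· ++ [letter]))
       PySem.Dict.empty).getD c []
    = ("abcdefghijklmnopqrstuvwxyz".toList).filter (fun ch => cnt ch == c) := by
  have h1 : ("abcdefghijklmnopqrstuvwxyz".toList).foldl
      (fun (b : PySem.Dict Int (List Char)) letter => b.modify (cnt letter) [] (· ++ [letter]))
      PySem.Dict.empty
    = (("abcdefghijklmnopqrstuvwxyz".toList).map (fun ch => (cnt ch, ch))).foldl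
      (fun (b : PySem.Dict Int (List Char)) p => b.modify p.1 [] (· ++ [p.2]))
      PySem.Dict.empty := by rw [List.foldl_map]
  rw [h1, PySem.Dict.getD_foldl_modify_append, PySem.Dict.getD_empty, List.filter_map,
    List.map_map]
  simp [Function.comp_def]

-- B-side: emitting the buckets by ascending count equals the stable sort of the 26 pairs
set_option maxHeartbeats 1000000 in
theorem b_emit (cnt : Char → Int) :
    ((PySem.List.sorted (PySem.Set.ofList (("abcdefghijklmnopqrstuvwxyz".toList).map cnt))
        (fun x => x)).foldl
       (fun (d : PySem.Dict String Int) c =>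
         (("abcdefghijklmnopqrstuvwxyz".toList).filter (fun ch => cnt ch == c)).foldl
           (fun d letter => d.insert (String.ofList [letter]) c) d)
       PySem.Dict.empty).items
    = PySem.List.sorted
        (("abcdefghijklmnopqrstuvwxyz".toList).map (fun ch => (String.ofList [ch], cnt ch)))
        (fun item => item.2) := by
  have hmapsnd : (("abcdefghijklmnopqrstuvwxyz".toList).map
      (fun ch => (String.ofList [ch], cnt ch))).map (fun item : String × Int => item.2)
    = ("abcdefghijklmnopqrstuvwxyz".toList).map cnt := by
    rw [List.map_map]; rfl
  have hflat : (PySem.List.sorted (PySem.Set.ofList (("abcdefghijklmnopqrstuvwxyz".toList).map cnt))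
        (fun x => x)).foldl
       (fun (d : PySem.Dict String Int) c =>
         (("abcdefghijklmnopqrstuvwxyz".toList).filter (fun ch => cnt ch == c)).foldl
           (fun d letter => d.insert (String.ofList [letter]) c) d)
       PySem.Dict.empty
    = ((PySem.List.sorted (PySem.Set.ofList (("abcdefghijklmnopqrstuvwxyz".toList).map cnt))
        (fun x => x)).flatMap
       (fun c => (("abcdefghijklmnopqrstuvwxyz".toList).filter (fun ch => cnt ch == c)).map
         (fun letter => (String.ofList [letter], c)))).foldl
       (fun (d : PySem.Dict String Int) p => d.insert p.1 p.2) PySem.Dict.empty := by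
    rw [List.foldl_flatMap]
    apply PySem.List.foldl_congr_mem
    intro acc c _
    rw [List.foldl_map]
  have hnd : (((PySem.List.sorted (PySem.Set.ofList (("abcdefghijklmnopqrstuvwxyz".toList).map cnt))
        (fun x => x)).flatMap
       (fun c => (("abcdefghijklmnopqrstuvwxyz".toList).filter (fun ch => cnt ch == c)).map
         (fun letter => (String.ofList [letter], c)))).map Prod.fst).Nodup := by
    rw [List.map_flatMap]
    simp only [List.map_map]
    apply List.nodup_flatMap.mpr
    constructor
    · intro c _
      refine List.Nodup.map ?_ (List.Nodup.filter _ (by decide))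
      intro a b hab
      have := congrArg String.toList hab
      simpa using this
    · have hlt := PySem.List.sorted_ofList_pairwise_lt
        (("abcdefghijklmnopqrstuvwxyz".toList).map cnt)
      refine hlt.imp ?_
      intro c c' hcc' s hs hs'
      simp only [List.mem_map, List.mem_filter, Function.comp_apply] at hs hs'
      obtain ⟨a, ⟨_, ha2⟩, has⟩ := hs
      obtain ⟨b, ⟨_, hb2⟩, hbs⟩ := hs'
      have hab : a = b := by
        have := congrArg String.toList (has.trans hbs.symm)
        simpa using this
      have : c = c' := by
        have h1 : cnt a = c := by simpa using ha2
        have h2 : cnt b = c' := by simpa using hb2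
        rw [← h1, ← h2, hab]
      omega
  rw [hflat]
  rw [PySem.Dict.items_foldl_insert_fresh _ Prod.fst Prod.snd PySem.Dict.empty
    (fun p _ => PySem.Dict.contains_empty p.1) hnd]
  rw [sorted_eq_buckets (fun item : String × Int => item.2)
    (("abcdefghijklmnopqrstuvwxyz".toList).map (fun ch => (String.ofList [ch], cnt ch))),
    hmapsnd]
  rw [show (PySem.Dict.empty : PySem.Dict String Int).items = ([] : List (String × Int)) from rfl,
    List.nil_append]
  have hbf : ∀ c : Int,
      (("abcdefghijklmnopqrstuvwxyz".toList).filter (fun ch => cnt ch == c)).map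
        (fun letter => (String.ofList [letter], c)) =
      (("abcdefghijklmnopqrstuvwxyz".toList).map
        (fun ch => (String.ofList [ch], cnt ch))).filter (fun a => a.2 == c) := by
    intro c
    rw [List.filter_map]
    rw [show ("abcdefghijklmnopqrstuvwxyz".toList).filter
        ((fun a : String × Int => a.2 == c) ∘ (fun ch => (String.ofList [ch], cnt ch))) =
        ("abcdefghijklmnopqrstuvwxyz".toList).filter (fun ch => cnt ch == c) from
      List.filter_congr (fun a _ => rfl)]
    apply List.map_congr_left
    intro ch hch
    rw [List.mem_filter] at hch
    have : cnt ch = c := by simpa using hch.2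
    simp [this]
  simp only [hbf]
  simp
-- the letter keys of the sorted pair list are distinct
theorem sorted_pairs_fst_nodup (v : Char → Int) :
    ((PySem.List.sorted (("abcdefghijklmnopqrstuvwxyz".toList).map
        (fun c => (String.ofList [c], v c))) (fun item => item.2)).map Prod.fst).Nodup := by
  have hperm : ((PySem.List.sorted (("abcdefghijklmnopqrstuvwxyz".toList).map
      (fun c => (String.ofList [c], v c))) (fun item => item.2)).map Prod.fst).Perm
      ((("abcdefghijklmnopqrstuvwxyz".toList).map
        (fun c => (String.ofList [c], v c))).map Prod.fst) :=
    (PySem.List.sorted_perm _ _ _).map Prod.fst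
  refine hperm.nodup_iff.mpr ?_
  rw [List.map_map]
  refine List.Nodup.map ?_ (by decide)
  intro a b hab
  have := congrArg String.toList hab
  simpa using this

-- the verdict, via per-position equality
theorem occurancesAtIdx_spec_aux (listOWords : List String)
    (hpre : Pre_occurancesAtIdx listOWords) :
    occurancesAtIdx listOWords = occurancesAtIdx_alt listOWords := by
  unfold occurancesAtIdx occurancesAtIdx_alt
  apply PySem.List.foldl_congr_mem
  intro acc idx hidx
  have hidx' : 0 ≤ idx ∧ idx < 5 := PySem.List.mem_pyRange_one.mp hidx
  simp only [List.append_cancel_left_eq, List.cons.injEq, and_true]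
  -- the column of position-idx characters
  have hget : ∀ w ∈ listOWords, PySem.List.pyGet? w.toList idx =
      some ((PySem.List.pyGet? w.toList idx).getD ' ') := by
    intro w hw
    have hlen : idx < (w.toList.length : Int) := by
      have := hpre w hw; omega
    rw [PySem.List.pyGet?_eq_some_getElem w.toList hidx'.1 hlen]
    rfl
  have hbig : PySem.Chars.join [] (listOWords.map (fun wordle =>
      ((PySem.List.pyGet? wordle.toList idx).map (fun c => [c])).getD [])) =
      listOWords.map (fun w => (PySem.List.pyGet? w.toList idx).getD ' ') := by
    rw [show listOWords.map (fun wordle =>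
        ((PySem.List.pyGet? wordle.toList idx).map (fun c => [c])).getD []) =
        (listOWords.map (fun w => (PySem.List.pyGet? w.toList idx).getD ' ')).map (fun c => [c]) by
      rw [List.map_map]
      exact List.map_congr_left (fun w hw => by rw [hget w hw]; rfl)]
    exact PySem.Chars.join_nil_singletons _
  simp only [hbig, chars_count_singleton]
  -- A's letters loop is one stable sort of the 26 (letter, count) pairs
  have hA := a_inner_fold
    (fun c => ((listOWords.map (fun w => (PySem.List.pyGet? w.toList idx).getD ' ')).count c : Int))
    ("abcdefghijklmnopqrstuvwxyz".toList) [] (by decide)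
  simp only [List.nil_append, List.map_nil,
    show PySem.List.sorted ([] : List (String × Int)) (fun item => item.2) = [] from rfl,
    show (PySem.Dict.ofList ([] : List (String × Int))) = PySem.Dict.empty from rfl] at hA
  rw [hA, ofList_items_of_nodup _ (sorted_pairs_fst_nodup _)]
  -- B's tally lookups are the same counts
  simp only [b_counts_getD listOWords idx _ hidx]
  -- B's buckets and emission
  simp only [b_buckets_keys, b_buckets_getD]
  rw [b_emit]

-- ===== VERDICT (by name: the statement is the Claim_ definition above) =====
theorem occurancesAtIdx_spec : Claim_equal_occurancesAtIdx := by
  intro listOWords _ hpre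
  exact occurancesAtIdx_spec_aux listOWords hpre
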